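-- pv_equiv track=rewrite | github.com/januarharianto/annotation-coding-environment | src/ace/services/chord_assignment.py | assign_chord
-- ===== SOURCE A (Python) =====
-- import string
--
-- STOP_WORDS: frozenset[str] = frozenset({
--     "a", "an", "and", "or", "of", "the", "to", "in", "on",
--     "at", "with", "for", "by",
-- })
--
-- _CONSONANTS = "bcdfghjklmnpqrstvwxyz"
--
-- _LOWERCASE = string.ascii_lowercase
--
-- _DIGITS = "123456789"
--
-- def _meaningful_words(name: str) -> list[str]:
--     """Lowercase the name; split on whitespace; drop stop-words; drop empties."""
--     words = [w.lower() for w in name.split() if w.strip()]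
--     return [w for w in words if w not in STOP_WORDS]
--
-- def _ascii_letters(word: str) -> str:
--     """Strip non-ASCII-letter characters from a word."""
--     return "".join(c for c in word if c in _LOWERCASE)
--
-- def _try_chord(chord: str, taken: set[str]) -> str | None:
--     """Return chord if it's 2 ASCII lowercase letters and not taken, else None."""
--     if len(chord) == 2 and chord[0] in _LOWERCASE and chord[1] in _LOWERCASE:
--         if chord not in taken:
--             return chord
--     return None
--
-- def _alphabetical_pair(taken: set[str]) -> str:
--     """Return the first 2-letter pair (aa, ab, ac...) not in taken."""
--     for first in _LOWERCASE:
--         for second in _LOWERCASE: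
--             chord = first + second
--             if chord not in taken:
--                 return chord
--     # All 676 alphabetical pairs taken — fall through to numeric
--     return _numeric_escape("a", taken)
--
-- def _numeric_escape(prefix: str, taken: set[str]) -> str:
--     """After alphabet exhausted, append digits: a1, a2..."""
--     for digit in _DIGITS:
--         chord = prefix + digit
--         if chord not in taken:
--             return chord
--     raise RuntimeError(f"Chord space exhausted: all 35 chords for prefix '{prefix}' are taken")
--
-- def assign_chord(name: str, taken: set[str]) -> str:
--     """Pick a 2-letter chord for `name` that isn't in `taken`.
--
--     Algorithm:
--     1. Tokenise; drop stop-words.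
--     2. If 2+ words: try first letter of word 1 + first letter of word 2.
--     3. If 1 word: try first 2 letters.
--     4. On collision: walk consonants of word 2, then word 1, then alphabet.
--     5. If first letter is non-ASCII or words list is empty: alphabetical fallback.
--     6. Past 26 alphabetical fallbacks for the same first letter: numeric escape.
--     """
--     words = _meaningful_words(name)
--
--     # Empty / pure non-ASCII → alphabetical from start
--     if not words:
--         return _alphabetical_pair(taken)
--
--     word1 = _ascii_letters(words[0])
--     if not word1:
--         return _alphabetical_pair(taken)
--
--     first = word1[0]
--     word2 = _ascii_letters(words[1]) if len(words) >= 2 else ""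
--
--     # Pick initial second letter
--     if word2:
--         second = word2[0]
--     else:
--         second = word1[1] if len(word1) > 1 else first
--
--     # Initial guess
--     if (chord := _try_chord(first + second, taken)):
--         return chord
--
--     # Cascade: walk consonants of word 2 (if any)
--     for letter in word2[1:]:  # skip already-tried first letter
--         if letter in _CONSONANTS:
--             if (chord := _try_chord(first + letter, taken)):
--                 return chord
--
--     # Cascade: walk consonants of word 1
--     for letter in word1[1:]:
--         if letter in _CONSONANTS:
--             if (chord := _try_chord(first + letter, taken)):
--                 return chord
--
--     # Cascade: walk full alphabet for second letter
--     for letter in _LOWERCASE: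
--         if (chord := _try_chord(first + letter, taken)):
--             return chord
--
--     # All `first*` chords taken — numeric escape
--     return _numeric_escape(first, taken)
-- ===== SOURCE B (Python) =====
-- import string
--
-- STOP_WORDS: frozenset[str] = frozenset({
--     "a", "an", "and", "or", "of", "the", "to", "in", "on",
--     "at", "with", "for", "by",
-- })
--
-- _CONSONANTS = "bcdfghjklmnpqrstvwxyz"
--
-- _LOWERCASE = string.ascii_lowercase
--
-- _DIGITS = "123456789"
--
--
-- def _meaningful_words(name: str) -> list[str]:
--     words = [w.lower() for w in name.split() if w.strip()]
--     return [w for w in words if w not in STOP_WORDS]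
--
--
-- def _ascii_letters(word: str) -> str:
--     return "".join(c for c in word if c in _LOWERCASE)
--
--
-- def assign_chord(name: str, taken: set[str]) -> str:
--     """Inverted traversal: filter the fixed suffix universe (a-z, 1-9) against
--     `taken` once, then pick the free suffix whose first occurrence in the
--     priority sequence is earliest (min with key=priority.index).  The fallback
--     branch returns the lexicographically smallest free pair, since the nested
--     aa..zz scan order is exactly string order."""
--     words = _meaningful_words(name)
--     word1 = _ascii_letters(words[0]) if words else ""
--     if word1:
--         first = word1[0]
--         word2 = _ascii_letters(words[1]) if len(words) >= 2 else ""
--         initial = word2[0] if word2 else (word1[1] if len(word1) > 1 else first)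
--         priority = ([initial]
--                     + [c for c in word2[1:] if c in _CONSONANTS]
--                     + [c for c in word1[1:] if c in _CONSONANTS]
--                     + list(_LOWERCASE) + list(_DIGITS))
--         free = [l for l in _LOWERCASE + _DIGITS if first + l not in taken]
--         if free:
--             return first + min(free, key=priority.index)
--         raise RuntimeError(
--             f"Chord space exhausted: all 35 chords for prefix '{first}' are taken")
--     free = [a + b for a in _LOWERCASE for b in _LOWERCASE if a + b not in taken]
--     if free:
--         return min(free)
--     free = ["a" + d for d in _DIGITS if "a" + d not in taken]
--     if free:
--         return min(free)
--     raise RuntimeError(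
--         "Chord space exhausted: all 35 chords for prefix 'a' are taken")
-- ===== Notes on version B (the rewrite author's own statement) =====
-- stated objective: alternative
-- what changed: A scans an ordered cascade of candidate chords and returns at the first membership test that succeeds; B inverts the traversal: it filters the fixed 35-suffix universe (a-z, 1-9) against taken once and then selects the free suffix whose first occurrence in the priority sequence is earliest (min with key=priority.index), and in the empty/non-ASCII fallback it returns the lexicographically smallest free pair (min over a set difference) instead of replaying the nested aa..zz scan.
import Mathlib
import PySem

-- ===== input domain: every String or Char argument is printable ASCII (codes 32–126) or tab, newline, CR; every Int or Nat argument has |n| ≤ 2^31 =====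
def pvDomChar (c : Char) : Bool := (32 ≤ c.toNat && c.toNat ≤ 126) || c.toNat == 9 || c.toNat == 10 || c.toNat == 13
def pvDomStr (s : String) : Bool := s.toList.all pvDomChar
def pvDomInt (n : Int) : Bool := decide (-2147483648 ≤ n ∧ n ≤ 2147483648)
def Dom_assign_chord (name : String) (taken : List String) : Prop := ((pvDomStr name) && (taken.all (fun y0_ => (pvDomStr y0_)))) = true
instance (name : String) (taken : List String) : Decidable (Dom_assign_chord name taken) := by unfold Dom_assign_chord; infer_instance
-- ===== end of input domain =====

-- B inverts A's traversal: instead of scanning the candidate cascade and testing each chord,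
-- it filters the fixed 35-suffix universe against `taken` once and takes the free suffix whose
-- first occurrence in the priority sequence is earliest (min with key=priority.index); the
-- fallback branch returns the lexicographically smallest free pair. Objective: alternative,
-- same cost. Pre_ excludes only the inputs where Python A raises RuntimeError (every chord
-- for the relevant prefix already taken); there both ports return "".


-- ===== PORT A =====
def pvSTOP : List String := ["a","an","and","or","of","the","to","in","on","at","with","for","by"]
def pvCONS : List Char := ['b','c','d','f','g','h','j','k','l','m','n','p','q','r','s','t','v','w','x','y','z']
def pvLOWER : List Char := ['a','b','c','d','e','f','g','h','i','j','k','l','m','n','o','p','q','r','s','t','u','v','w','x','y','z']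
def pvDIGITS : List Char := ['1','2','3','4','5','6','7','8','9']

-- _meaningful_words: split on whitespace, keep the non-blank ones, lowercase, drop stop-words
def pvMeaningfulWords (name : String) : List String :=
  (((PySem.Str.split₀ name).filter (fun w => PySem.Str.strip w != "")).map
    PySem.Str.lower).filter (fun w => ! pvSTOP.contains w)

-- _ascii_letters (a Python str kept as List Char)
def pvAsciiLetters (word : String) : List Char :=
  word.toList.filter (fun c => pvLOWER.contains c)

-- _try_chord (chord[0]/chord[1] via getD: the length-2 test has already passed)
def pvTryChord (chord : String) (taken : List String) : Option String :=
  if chord.toList.length == 2 && pvLOWER.contains (chord.toList.getD 0 ' ')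
      && pvLOWER.contains (chord.toList.getD 1 ' ') then
    if ! taken.contains chord then some chord else none
  else none

-- _numeric_escape; on the RuntimeError path ("Chord space exhausted") it returns ""
def pvNumericEscape (pre : Char) (digits : List Char) (taken : List String) : String :=
  match digits with
  | [] => ""
  | d :: ds =>
    let chord := String.ofList [pre, d]
    if ! taken.contains chord then chord else pvNumericEscape pre ds taken

-- the two consonant cascades of assign_chord (early-return loop)
def pvCascade (first : Char) (letters : List Char) (taken : List String) : Option String :=
  match letters with
  | [] => none
  | l :: ls =>
    if pvCONS.contains l then
      match pvTryChord (String.ofList [first, l]) taken with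
      | some c => some c
      | none => pvCascade first ls taken
    else pvCascade first ls taken

-- the final full-alphabet loop of assign_chord
def pvAlphaScan (first : Char) (letters : List Char) (taken : List String) : Option String :=
  match letters with
  | [] => none
  | l :: ls =>
    match pvTryChord (String.ofList [first, l]) taken with
    | some c => some c
    | none => pvAlphaScan first ls taken

-- inner/outer loops of _alphabetical_pair
def pvPairInner (a : Char) (bs : List Char) (taken : List String) : Option String :=
  match bs with
  | [] => none
  | b :: bs' =>
    let chord := String.ofList [a, b]
    if ! taken.contains chord then some chord else pvPairInner a bs' taken

def pvPairOuter (as_ : List Char) (taken : List String) : Option String :=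
  match as_ with
  | [] => none
  | a :: as' =>
    match pvPairInner a pvLOWER taken with
    | some c => some c
    | none => pvPairOuter as' taken

def pvAlphabeticalPair (taken : List String) : String :=
  match pvPairOuter pvLOWER taken with
  | some c => c
  | none => pvNumericEscape 'a' pvDIGITS taken

def assign_chord (name : String) (taken : List String) : String :=
  let words := pvMeaningfulWords name
  if words.isEmpty then pvAlphabeticalPair taken
  else
    let word1 := pvAsciiLetters (words.getD 0 "")
    if word1.isEmpty then pvAlphabeticalPair taken
    else
      let first := word1.getD 0 ' '
      let word2 := if 2 ≤ words.length then pvAsciiLetters (words.getD 1 "") else []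
      let second := if ! word2.isEmpty then word2.getD 0 ' '
                    else if 1 < word1.length then word1.getD 1 ' ' else first
      match pvTryChord (String.ofList [first, second]) taken with
      | some c => c
      | none =>
        match pvCascade first (word2.drop 1) taken with
        | some c => c
        | none =>
          match pvCascade first (word1.drop 1) taken with
          | some c => c
          | none =>
            match pvAlphaScan first pvLOWER taken with
            | some c => c
            | none => pvNumericEscape first pvDIGITS taken

-- ===== PORT B =====
-- inverted traversal: filter the fixed suffix universe against `taken` once, then pick the
-- free suffix whose first occurrence in the priority sequence is earliest (min, key=index);
-- the fallback branch takes the lexicographically smallest free pair (min over the set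
-- difference). "" stands where Python B raises RuntimeError.
def assign_chord_alt (name : String) (taken : List String) : String :=
  let words := pvMeaningfulWords name
  let word1 := if ! words.isEmpty then pvAsciiLetters (words.getD 0 "") else []
  if ! word1.isEmpty then
    let first := word1.getD 0 ' '
    let word2 := if 2 ≤ words.length then pvAsciiLetters (words.getD 1 "") else []
    let initial := if ! word2.isEmpty then word2.getD 0 ' '
                   else if 1 < word1.length then word1.getD 1 ' ' else first
    let priority := [initial] ++ (word2.drop 1).filter (fun c => pvCONS.contains c)
                  ++ (word1.drop 1).filter (fun c => pvCONS.contains c) ++ pvLOWER ++ pvDIGITS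
    let free := (pvLOWER ++ pvDIGITS).filter
        (fun l => ! taken.contains (String.ofList [first, l]))
    match PySem.List.min? free (fun l => (PySem.List.index? priority l).getD 0) with
    | some l => String.ofList [first, l]
    | none => ""  -- Python raises RuntimeError here
  else
    let freePairs := (pvLOWER.flatMap (fun a => pvLOWER.map (fun b => String.ofList [a, b]))).filter
        (fun c => ! taken.contains c)
    match PySem.List.min? freePairs (fun x => x) with
    | some c => c
    | none =>
      let freeDigits := (pvDIGITS.map (fun d => String.ofList ['a', d])).filter
          (fun c => ! taken.contains c)
      match PySem.List.min? freeDigits (fun x => x) with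
      | some c => c
      | none => ""  -- Python raises RuntimeError here

-- ===== PRECONDITION & SPEC =====
-- Pre_ excludes exactly the inputs on which Python A raises RuntimeError ("Chord space
-- exhausted"): every chord with the relevant prefix (all 676 pairs plus 'a1'..'a9' in the
-- fallback branch, else the 26 letter and 9 digit chords for the first letter) is taken.
def Pre_assign_chord (name : String) (taken : List String) : Prop :=
  let words := pvMeaningfulWords name
  let word1 := if ! words.isEmpty then pvAsciiLetters (words.getD 0 "") else []
  (if word1.isEmpty then
    !((pvLOWER.all fun a => pvLOWER.all fun b => taken.contains (String.ofList [a, b])) &&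
      (pvDIGITS.all fun d => taken.contains (String.ofList ['a', d])))
  else
    !((pvLOWER ++ pvDIGITS).all fun c => taken.contains (String.ofList [word1.getD 0 ' ', c]))) = true

instance (name : String) (taken : List String) : Decidable (Pre_assign_chord name taken) := by
  unfold Pre_assign_chord; infer_instance

def pvWitness_assign_chord : String × List String := ("b", [])

def Spec_assign_chord (name : String) (taken : List String) (out : String) : Prop := out = assign_chord_alt name taken
instance (name : String) (taken : List String) (out : String) : Decidable (Spec_assign_chord name taken out) := by unfold Spec_assign_chord; infer_instance

-- ===== CLAIM (what is proved, stated in full; the proofs are below) =====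
def Claim_equal_assign_chord : Prop := ∀ (name : String) (taken : List String), Dom_assign_chord name taken → Pre_assign_chord name taken → Spec_assign_chord name taken (assign_chord name taken)

-- ===== LEMMAS AND PROOFS =====

-- ---- A-side loop characterisations (each loop as a find? over its candidate list) ----

theorem pvCons_sub_lower_aux : pvCONS.all (fun c => pvLOWER.contains c) = true := by rfl

theorem pvCons_sub_lower : ∀ c ∈ pvCONS, c ∈ pvLOWER := by
  intro c hc
  simpa using List.all_eq_true.mp pvCons_sub_lower_aux c hc

theorem pvTryChord_eq (f l : Char) (taken : List String)
    (hf : f ∈ pvLOWER) (hl : l ∈ pvLOWER) :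
    pvTryChord (String.ofList [f, l]) taken =
      if ! taken.contains (String.ofList [f, l]) then some (String.ofList [f, l]) else none := by
  simp [pvTryChord, hf, hl]

theorem pvCascade_eq (f : Char) (ls : List Char) (taken : List String)
    (hf : f ∈ pvLOWER) :
    pvCascade f ls taken =
      ((ls.filter (fun c => pvCONS.contains c)).map (fun l => String.ofList [f, l])).find?
        (fun c => ! taken.contains c) := by
  induction ls with
  | nil => rfl
  | cons l ls ih =>
    rw [pvCascade]
    by_cases hc : l ∈ pvCONS
    · rw [if_pos (by simpa using hc), pvTryChord_eq f l taken hf (pvCons_sub_lower l hc)]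
      by_cases ht : String.ofList [f, l] ∈ taken <;>
        simp [ht, hc, ih]
    · rw [if_neg (by simpa using hc)]
      simp [hc, ih]

theorem pvAlphaScan_eq (f : Char) (ls : List Char) (taken : List String)
    (hf : f ∈ pvLOWER) (hls : ∀ c ∈ ls, c ∈ pvLOWER) :
    pvAlphaScan f ls taken =
      (ls.map (fun l => String.ofList [f, l])).find? (fun c => ! taken.contains c) := by
  induction ls with
  | nil => rfl
  | cons l ls ih =>
    rw [pvAlphaScan, pvTryChord_eq f l taken hf (hls l List.mem_cons_self)]
    by_cases ht : String.ofList [f, l] ∈ taken <;>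
      simp [ht, ih (fun c hc => hls c (List.mem_cons_of_mem _ hc))]

theorem pvNumericEscape_eq (p : Char) (ds : List Char) (taken : List String) :
    pvNumericEscape p ds taken =
      match (ds.map (fun d => String.ofList [p, d])).find? (fun c => ! taken.contains c) with
      | some c => c
      | none => "" := by
  induction ds with
  | nil => rfl
  | cons d ds ih =>
    rw [pvNumericEscape]
    by_cases ht : String.ofList [p, d] ∈ taken <;> simp [ht, ih]

theorem pvPairInner_eq (a : Char) (bs : List Char) (taken : List String) :
    pvPairInner a bs taken =
      (bs.map (fun b => String.ofList [a, b])).find? (fun c => ! taken.contains c) := by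
  induction bs with
  | nil => rfl
  | cons b bs ih =>
    rw [pvPairInner]
    by_cases ht : String.ofList [a, b] ∈ taken <;> simp [ht, ih]

theorem pvPairOuter_eq (as_ : List Char) (taken : List String) :
    pvPairOuter as_ taken =
      (as_.flatMap (fun a => pvLOWER.map (fun b => String.ofList [a, b]))).find?
        (fun c => ! taken.contains c) := by
  induction as_ with
  | nil => rfl
  | cons a as' ih =>
    rw [pvPairOuter, pvPairInner_eq, ih, List.flatMap_cons, List.find?_append]
    cases h : (pvLOWER.map (fun b => String.ofList [a, b])).find? (fun c => ! taken.contains c) <;>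
      simp [Option.or]

theorem pvAsciiLetters_mem_lower (w : String) (c : Char) (hc : c ∈ pvAsciiLetters w) :
    c ∈ pvLOWER := by
  simpa using (List.of_mem_filter hc)

theorem pvGetD_zero_mem (xs : List Char) (d : Char) (h : xs ≠ []) : xs.getD 0 d ∈ xs := by
  cases xs with
  | nil => exact absurd rfl h
  | cons x xs => simp [List.getD]

theorem pvGetD_one_mem (xs : List Char) (d : Char) (h : 1 < xs.length) : xs.getD 1 d ∈ xs := by
  rw [List.getD_eq_getElem xs d h]
  exact List.getElem_mem h

-- ---- B-side: min?/find? bridges ----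

-- min? returns the element that is strictly below every other one
theorem pvMin?_unique {α κ : Type} [LinearOrder κ] {xs : List α} {key : α → κ} {m : α}
    (hm : m ∈ xs) (h : ∀ y ∈ xs, y ≠ m → key m < key y) :
    PySem.List.min? xs key = some m := by
  cases hmin : PySem.List.min? xs key with
  | none =>
    rw [PySem.List.min?_eq_none_iff] at hmin
    subst hmin; cases hm
  | some m' =>
    have hmem := PySem.List.min?_mem hmin
    have hle := PySem.List.min?_isMin hmin m hm
    by_cases hne : m' = m
    · rw [hne]
    · exact absurd hle (not_le_of_gt (h m' hmem hne))

-- on a strictly increasing list, min (no key) is the head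
theorem pvMin?_id_sorted (l : List String) (h : l.Pairwise (· < ·)) :
    PySem.List.min? l (fun x => x) = l.head? := by
  cases l with
  | nil => rfl
  | cons c t =>
    have := List.pairwise_cons.mp h
    exact pvMin?_unique List.mem_cons_self
      (fun y hy hne => this.1 y (by rcases List.mem_cons.mp hy with h' | h'; exact absurd h' hne; exact h'))

-- A's ordered scan over P = the free element of the universe U with the earliest index in P
theorem pvFind?_eq_min?_index (P U : List Char) (p : Char → Bool)
    (hPU : ∀ c ∈ P, c ∈ U) (hUP : ∀ c ∈ U, c ∈ P) :
    PySem.List.min? (U.filter p) (fun l => (PySem.List.index? P l).getD 0) = P.find? p := by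
  cases hf : P.find? p with
  | none =>
    rw [List.find?_eq_none] at hf
    have : U.filter p = [] := by
      rw [List.filter_eq_nil_iff]
      exact fun c hc hp => hf c (hUP c hc) hp
    rw [this, PySem.List.min?_eq_none_iff]
  | some c =>
    obtain ⟨hpc, i, hi, hPi, hmin⟩ := List.find?_eq_some_iff_getElem.mp hf
    have hidx : PySem.List.index? P c = some i := by
      rw [PySem.List.index?_eq_idxOf?, List.idxOf?_eq_some_iff]
      refine ⟨hi, hPi, fun j hj hPj => ?_⟩
      have := hmin j hj
      rw [hPj, hpc] at this
      exact absurd this (by simp)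
    refine pvMin?_unique ?_ ?_
    · exact List.mem_filter.mpr ⟨hPU c (hPi ▸ List.getElem_mem hi), hpc⟩
    · intro y hy hne
      obtain ⟨hyU, hpy⟩ := List.mem_filter.mp hy
      have hyP : y ∈ P := hUP y hyU
      obtain ⟨j, hj⟩ := Option.isSome_iff_exists.mp
        ((PySem.List.index?_isSome_iff P y).mpr hyP)
      obtain ⟨hjlen, hPj, _⟩ := List.idxOf?_eq_some_iff.mp
        (by rwa [PySem.List.index?_eq_idxOf?] at hj)
      have hij : i < j := by
        rcases Nat.lt_trichotomy j i with h' | h' | h'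
        · have := hmin j h'
          rw [hPj, hpy] at this
          exact absurd this (by simp)
        · subst h'
          exact absurd (hPj.symm.trans hPi) hne
        · exact h'
      rw [hidx, hj]
      simpa using hij

-- two-char strings compare first on the first char, then on the second
theorem pvStrLt2 (a b c d : Char) (h : a < c ∨ (a = c ∧ b < d)) :
    String.ofList [a, b] < String.ofList [c, d] := by
  rw [String.lt_iff_toList_lt, String.toList_ofList, String.toList_ofList,
    List.cons_lt_cons_iff]
  rcases h with h | ⟨h1, h2⟩
  · exact Or.inl h
  · exact Or.inr ⟨h1, by rw [List.cons_lt_cons_iff]; exact Or.inl h2⟩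

theorem pvLower_pairwise : pvLOWER.Pairwise (· < ·) := by decide

theorem pvDigits_pairwise : pvDIGITS.Pairwise (· < ·) := by decide

theorem pvPairs_pairwise :
    (pvLOWER.flatMap (fun a => pvLOWER.map (fun b => String.ofList [a, b]))).Pairwise
      (· < ·) := by
  rw [List.pairwise_flatMap]
  constructor
  · intro a _
    rw [List.pairwise_map]
    exact pvLower_pairwise.imp (fun h => pvStrLt2 _ _ _ _ (Or.inr ⟨rfl, h⟩))
  · refine pvLower_pairwise.imp ?_
    intro a a' hlt x hx y hy
    obtain ⟨b, _, rfl⟩ := List.mem_map.mp hx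
    obtain ⟨b', _, rfl⟩ := List.mem_map.mp hy
    exact pvStrLt2 _ _ _ _ (Or.inl hlt)

theorem pvDigitStrs_pairwise :
    (pvDIGITS.map (fun d => String.ofList ['a', d])).Pairwise (· < ·) := by
  rw [List.pairwise_map]
  exact pvDigits_pairwise.imp (fun h => pvStrLt2 _ _ _ _ (Or.inr ⟨rfl, h⟩))

-- min over the free part of a strictly increasing candidate list = the ordered scan
theorem pvMin?_filter_sorted (l : List String) (p : String → Bool)
    (h : l.Pairwise (· < ·)) :
    PySem.List.min? (l.filter p) (fun x => x) = l.find? p := by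
  rw [pvMin?_id_sorted _ (h.filter p), List.head?_filter]

-- the fallback branches agree
theorem pvFallback_eq (taken : List String) :
    pvAlphabeticalPair taken =
      (match PySem.List.min?
          ((pvLOWER.flatMap (fun a => pvLOWER.map (fun b => String.ofList [a, b]))).filter
            (fun c => ! taken.contains c)) (fun x => x) with
      | some c => c
      | none =>
        match PySem.List.min?
            ((pvDIGITS.map (fun d => String.ofList ['a', d])).filter
              (fun c => ! taken.contains c)) (fun x => x) with
        | some c => c
        | none => "") := by
  unfold pvAlphabeticalPair
  rw [pvPairOuter_eq, pvNumericEscape_eq,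
    pvMin?_filter_sorted _ _ pvPairs_pairwise, pvMin?_filter_sorted _ _ pvDigitStrs_pairwise]

-- A's main branch as a single find? over the priority list mapped to chords
theorem pvMainA (word1 word2 : List Char) (first second : Char) (taken : List String)
    (hf : first ∈ pvLOWER) (hs : second ∈ pvLOWER) :
    (match pvTryChord (String.ofList [first, second]) taken with
     | some c => c
     | none =>
       match pvCascade first (word2.drop 1) taken with
       | some c => c
       | none =>
         match pvCascade first (word1.drop 1) taken with
         | some c => c
         | none =>
           match pvAlphaScan first pvLOWER taken with
           | some c => c
           | none => pvNumericEscape first pvDIGITS taken) =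
    (match (([second] ++ (word2.drop 1).filter (fun c => pvCONS.contains c)
          ++ (word1.drop 1).filter (fun c => pvCONS.contains c) ++ pvLOWER ++ pvDIGITS).map
          (fun l => String.ofList [first, l])).find? (fun c => ! taken.contains c) with
     | some c => c
     | none => "") := by
  rw [pvTryChord_eq _ _ _ hf hs, pvCascade_eq _ _ _ hf, pvCascade_eq _ _ _ hf,
      pvAlphaScan_eq _ _ _ hf (fun c hc => hc), pvNumericEscape_eq]
  simp only [List.map_append, List.find?_append, List.map_cons, List.map_nil,
    List.find?_cons, List.find?_nil]
  by_cases ht : String.ofList [first, second] ∈ taken <;>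
  cases h2 : (((word2.drop 1).filter (fun c => pvCONS.contains c)).map
      (fun l => String.ofList [first, l])).find? (fun c => ! taken.contains c) <;>
  cases h1 : (((word1.drop 1).filter (fun c => pvCONS.contains c)).map
      (fun l => String.ofList [first, l])).find? (fun c => ! taken.contains c) <;>
  cases ha : (pvLOWER.map (fun l => String.ofList [first, l])).find?
      (fun c => ! taken.contains c) <;>
  cases hd : (pvDIGITS.map (fun l => String.ofList [first, l])).find?
      (fun c => ! taken.contains c) <;>
    simp [ht, Option.or]

-- the main branches agree
theorem pvMain_eq (word1 word2 : List Char) (first second : Char) (taken : List String)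
    (hf : first ∈ pvLOWER) (hs : second ∈ pvLOWER) :
    (match pvTryChord (String.ofList [first, second]) taken with
     | some c => c
     | none =>
       match pvCascade first (word2.drop 1) taken with
       | some c => c
       | none =>
         match pvCascade first (word1.drop 1) taken with
         | some c => c
         | none =>
           match pvAlphaScan first pvLOWER taken with
           | some c => c
           | none => pvNumericEscape first pvDIGITS taken) =
    (match PySem.List.min?
        ((pvLOWER ++ pvDIGITS).filter (fun l => ! taken.contains (String.ofList [first, l])))
        (fun l => (PySem.List.index?
          ([second] ++ (word2.drop 1).filter (fun c => pvCONS.contains c)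
            ++ (word1.drop 1).filter (fun c => pvCONS.contains c) ++ pvLOWER ++ pvDIGITS) l).getD 0) with
     | some l => String.ofList [first, l]
     | none => "") := by
  rw [pvMainA word1 word2 first second taken hf hs]
  have hPU : ∀ c ∈ ([second] ++ (word2.drop 1).filter (fun c => pvCONS.contains c)
      ++ (word1.drop 1).filter (fun c => pvCONS.contains c) ++ pvLOWER ++ pvDIGITS),
      c ∈ pvLOWER ++ pvDIGITS := by
    intro c hc
    simp only [List.append_assoc, List.mem_append, List.mem_singleton, List.mem_filter] at hc
    rcases hc with rfl | ⟨h, hcons⟩ | ⟨h, hcons⟩ | h | h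
    · exact List.mem_append.mpr (Or.inl hs)
    · exact List.mem_append.mpr (Or.inl (pvCons_sub_lower c (by simpa using hcons)))
    · exact List.mem_append.mpr (Or.inl (pvCons_sub_lower c (by simpa using hcons)))
    · exact List.mem_append.mpr (Or.inl h)
    · exact List.mem_append.mpr (Or.inr h)
  have hUP : ∀ c ∈ pvLOWER ++ pvDIGITS,
      c ∈ ([second] ++ (word2.drop 1).filter (fun c => pvCONS.contains c)
        ++ (word1.drop 1).filter (fun c => pvCONS.contains c) ++ pvLOWER ++ pvDIGITS) := by
    intro c hc
    simp only [List.append_assoc, List.mem_append] at hc ⊢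
    rcases hc with h | h
    · exact Or.inr (Or.inr (Or.inr (Or.inl h)))
    · exact Or.inr (Or.inr (Or.inr (Or.inr h)))
  rw [pvFind?_eq_min?_index _ _ _ hPU hUP, List.find?_map]
  simp only [Function.comp_def]
  cases h : (([second] ++ (word2.drop 1).filter (fun c => pvCONS.contains c)
      ++ (word1.drop 1).filter (fun c => pvCONS.contains c) ++ pvLOWER ++ pvDIGITS).find?
      (fun l => ! taken.contains (String.ofList [first, l]))) <;> rfl

set_option maxHeartbeats 1000000 in
theorem assign_chord_spec : Claim_equal_assign_chord := by
  intro name taken _ _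
  unfold Spec_assign_chord assign_chord assign_chord_alt
  by_cases hw : (pvMeaningfulWords name).isEmpty = true
  · simp only [hw, if_true, Bool.not_true, Bool.false_eq_true, if_false,
      List.isEmpty_nil]
    exact pvFallback_eq taken
  · have hw' : (pvMeaningfulWords name).isEmpty = false := by rwa [Bool.not_eq_true] at hw
    simp only [hw', Bool.false_eq_true, if_false, Bool.not_false, if_true]
    by_cases h1 : (pvAsciiLetters ((pvMeaningfulWords name).getD 0 "")).isEmpty = true
    · simp only [h1, if_true, Bool.not_true, Bool.false_eq_true, if_false]
      exact pvFallback_eq taken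
    · have h1' : (pvAsciiLetters ((pvMeaningfulWords name).getD 0 "")).isEmpty = false := by
        rwa [Bool.not_eq_true] at h1
      have hne : pvAsciiLetters ((pvMeaningfulWords name).getD 0 "") ≠ [] :=
        List.isEmpty_eq_false_iff.mp h1'
      simp only [h1', Bool.false_eq_true, if_false, Bool.not_false, if_true]
      generalize hg2 : (if 2 ≤ (pvMeaningfulWords name).length then
          pvAsciiLetters ((pvMeaningfulWords name).getD 1 "") else []) = w2
      generalize hg1 : pvAsciiLetters ((pvMeaningfulWords name).getD 0 "") = w1 at hne ⊢
      have hm1 : ∀ c ∈ w1, c ∈ pvLOWER := fun c hc => pvAsciiLetters_mem_lower _ c (hg1 ▸ hc)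
      have hm2 : ∀ c ∈ w2, c ∈ pvLOWER := by
        intro c hc
        rw [← hg2] at hc
        split_ifs at hc with h
        · exact pvAsciiLetters_mem_lower _ c hc
        · cases hc
      have hf : w1.getD 0 ' ' ∈ pvLOWER := hm1 _ (pvGetD_zero_mem _ _ hne)
      have hsec : (if (!w2.isEmpty) = true then w2.getD 0 ' '
          else if 1 < w1.length then w1.getD 1 ' ' else w1.getD 0 ' ') ∈ pvLOWER := by
        split_ifs with hw2 hlen
        · exact hm2 _ (pvGetD_zero_mem _ _ (List.isEmpty_eq_false_iff.mp (by simpa using hw2)))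
        · exact hm1 _ (pvGetD_one_mem _ _ hlen)
        · exact hf
      exact pvMain_eq w1 w2 _ _ taken hf hsec
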